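-- pv_equiv track=rewrite | github.com/demodulator1/Data-structure-course | T6.py | merge_sort_first_round
-- ===== SOURCE A (Python) =====
-- def merge_two_sorted_lists(list1, list2):
--     result = []
--     i, j = 0, 0
--     while i < len(list1) and j < len(list2):
--         if list1[i] <= list2[j]:
--             result.append(list1[i])
--             i += 1
--         else:
--             result.append(list2[j])
--             j += 1
--
--     result.extend(list1[i:])
--     result.extend(list2[j:])
--
--     return result
--
-- def merge_sort_first_round(arr):
--     subarrays = [[x] for x in arr]
--
--     result = []
--     for i in range(0, len(subarrays), 2):
--         if i + 1 < len(subarrays):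
--             result.append(merge_two_sorted_lists(subarrays[i], subarrays[i+1]))
--         else:
--             result.append(subarrays[i])
--
--     return [item for sublist in result for item in sublist]
-- ===== SOURCE B (Python) =====
-- def merge_sort_first_round(arr):
--     # One direct pass over consecutive pairs: emit each pair in order,
--     # no singleton lists, no generic merge, no flatten.
--     out = []
--     i = 0
--     n = len(arr)
--     while i + 1 < n:
--         a, b = arr[i], arr[i + 1]
--         out += (a, b) if a <= b else (b, a)
--         i += 2
--     if i < n:
--         out.append(arr[i])
--     return out
-- ===== Notes on version B (the rewrite author's own statement) =====
-- stated objective: simpler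
-- what changed: Replaces the singleton-list wrapping, generic two-pointer merge helper and nested-comprehension flatten with one direct pass that emits each adjacent pair in order (plus the odd tail element), with no intermediate list-of-lists.
import Mathlib
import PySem

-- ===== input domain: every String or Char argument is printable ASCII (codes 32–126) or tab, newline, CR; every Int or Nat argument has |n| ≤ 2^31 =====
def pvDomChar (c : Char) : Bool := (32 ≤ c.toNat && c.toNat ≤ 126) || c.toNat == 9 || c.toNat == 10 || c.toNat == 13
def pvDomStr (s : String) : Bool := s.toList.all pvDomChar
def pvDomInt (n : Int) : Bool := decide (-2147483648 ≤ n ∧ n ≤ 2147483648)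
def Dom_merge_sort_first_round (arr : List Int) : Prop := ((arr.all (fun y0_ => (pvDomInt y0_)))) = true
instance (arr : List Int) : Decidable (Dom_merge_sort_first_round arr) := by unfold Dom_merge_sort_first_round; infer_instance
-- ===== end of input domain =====

-- B replaces A's singleton-lists + two-pointer merge + flatten with a direct recursion
-- ordering each adjacent pair (objective: simpler).


-- ===== PORT A =====
-- the while loop of merge_two_sorted_lists: state (result, i, j); fuel makes the
-- recursion structural, len(list1)+len(list2) steps always suffice
def mtslLoop (list1 list2 : List Int) : Nat → List Int × Nat × Nat → List Int × Nat × Nat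
  | 0, st => st
  | fuel + 1, (result, i, j) =>
    if h : i < list1.length ∧ j < list2.length then
      if list1[i]'h.1 ≤ list2[j]'h.2 then
        mtslLoop list1 list2 fuel (result ++ [list1[i]'h.1], i + 1, j)
      else
        mtslLoop list1 list2 fuel (result ++ [list2[j]'h.2], i, j + 1)
    else (result, i, j)

def merge_two_sorted_lists (list1 list2 : List Int) : List Int :=
  let st := mtslLoop list1 list2 (list1.length + list2.length) ([], 0, 0)
  -- result.extend(list1[i:]); result.extend(list2[j:])
  st.1 ++ PySem.List.slice list1 (some (st.2.1 : Int)) none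
       ++ PySem.List.slice list2 (some (st.2.2 : Int)) none

def merge_sort_first_round (arr : List Int) : List Int :=
  let subarrays := arr.map (fun x => [x])
  let result :=
    (PySem.List.pyRange 0 (subarrays.length : Int) 2).foldl
      (fun res i =>
        if i + 1 < (subarrays.length : Int) then
          res ++ [merge_two_sorted_lists (PySem.List.pyGetD subarrays i [])
                                         (PySem.List.pyGetD subarrays (i + 1) [])]
        else
          res ++ [PySem.List.pyGetD subarrays i []]) []
  result.flatMap id

-- ===== PORT B =====
def merge_sort_first_round_alt : List Int → List Int
  | a :: b :: rest =>
      (if a ≤ b then [a, b] else [b, a]) ++ merge_sort_first_round_alt rest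
  | l => l

-- ===== PRECONDITION & SPEC =====
def Spec_merge_sort_first_round (arr : List Int) (out : List Int) : Prop := out = merge_sort_first_round_alt arr
instance (arr : List Int) (out : List Int) : Decidable (Spec_merge_sort_first_round arr out) := by unfold Spec_merge_sort_first_round; infer_instance

-- ===== CLAIM (what is proved, stated in full; the proofs are below) =====
def Claim_equal_merge_sort_first_round : Prop := ∀ (arr : List Int), Dom_merge_sort_first_round arr → Spec_merge_sort_first_round arr (merge_sort_first_round arr)

-- ===== LEMMAS AND PROOFS =====

-- A's loop body, indexed by the even position i into the singleton list
def pvStep (arr : List Int) (i : Int) : List Int :=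
  if i + 1 < ((arr.map (fun x => [x])).length : Int) then
    merge_two_sorted_lists (PySem.List.pyGetD (arr.map (fun x => [x])) i [])
                           (PySem.List.pyGetD (arr.map (fun x => [x])) (i + 1) [])
  else PySem.List.pyGetD (arr.map (fun x => [x])) i []

theorem merge_singletons (a b : Int) :
    merge_two_sorted_lists [a] [b] = if a ≤ b then [a, b] else [b, a] := by
  by_cases h : a ≤ b <;>
    simp [merge_two_sorted_lists, mtslLoop, h, PySem.List.slice_from]

theorem range_half (n : Nat) :
    (if (0 : Int) < (n : Int) then (((n : Int) - 0 + 2 - 1) / 2).toNat else 0)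
      = (n + 1) / 2 := by
  split <;> omega

theorem foldl_snoc_flat {α β : Type} (f : α → List β) :
    ∀ (l : List α) (acc : List (List β)),
      (l.foldl (fun res x => res ++ [f x]) acc).flatMap id
        = acc.flatMap id ++ l.flatMap f
  | [], acc => by simp
  | x :: l, acc => by
      rw [List.foldl_cons, foldl_snoc_flat f l]
      simp

theorem msfr_eq_flatMap (arr : List Int) :
    merge_sort_first_round arr
      = (List.range ((arr.length + 1) / 2)).flatMap
          (fun k : Nat => pvStep arr (2 * (k : Int))) := by
  have hfun : (fun (res : List (List Int)) (i : Int) =>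
      if i + 1 < ((arr.map (fun x => [x])).length : Int) then
          res ++ [merge_two_sorted_lists (PySem.List.pyGetD (arr.map (fun x => [x])) i [])
                                         (PySem.List.pyGetD (arr.map (fun x => [x])) (i + 1) [])]
        else res ++ [PySem.List.pyGetD (arr.map (fun x => [x])) i []])
      = fun res i => res ++ [pvStep arr i] := by
    funext res i
    simp only [pvStep]
    split <;> rfl
  show ((PySem.List.pyRange 0 ((arr.map (fun x => [x])).length : Int) 2).foldl
      (fun res i =>
        if i + 1 < ((arr.map (fun x => [x])).length : Int) then
          res ++ [merge_two_sorted_lists (PySem.List.pyGetD (arr.map (fun x => [x])) i [])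
                                         (PySem.List.pyGetD (arr.map (fun x => [x])) (i + 1) [])]
        else
          res ++ [PySem.List.pyGetD (arr.map (fun x => [x])) i []]) []).flatMap id
    = _
  rw [hfun, PySem.List.pyRange_of_pos 0 ((arr.map (fun x => [x])).length : Int) (by norm_num)]
  simp only [List.length_map, range_half, List.foldl_map]
  rw [foldl_snoc_flat (fun k : Nat => pvStep arr (0 + 2 * (k : Int)))]
  simp only [List.flatMap_nil, List.nil_append]
  exact List.flatMap_congr (fun k hk => by norm_num)

theorem pvStep_shift (x y : Int) (t : List Int) (k : Nat) :
    pvStep (x :: y :: t) (2 * (k + 1)) = pvStep t (2 * k) := by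
  simp only [pvStep, List.length_map, List.map_cons, List.length_cons]
  rw [PySem.List.pyGetD_of_nonneg _ _ (by positivity),
      PySem.List.pyGetD_of_nonneg _ _ (by positivity),
      PySem.List.pyGetD_of_nonneg (t.map (fun x => [x])) _ (by positivity),
      PySem.List.pyGetD_of_nonneg (t.map (fun x => [x])) _ (by positivity)]
  have h1 : ((2 * ((k : Int) + 1))).toNat = 2 * k + 2 := by omega
  have h2 : ((2 * ((k : Int) + 1)) + 1).toNat = 2 * k + 3 := by omega
  have h3 : ((2 * (k : Int))).toNat = 2 * k := by omega
  have h4 : ((2 * (k : Int)) + 1).toNat = 2 * k + 1 := by omega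
  have hc : (2 * ((k : Int) + 1) + 1 < (t.length : Int) + 1 + 1)
      ↔ (2 * (k : Int) + 1 < (t.length : Int)) := by omega
  rw [h1, h2, h3, h4]
  simp only [List.getD, List.getElem?_cons_succ]
  by_cases h : 2 * (k : Int) + 1 < (t.length : Int) <;>
    simp [hc.mpr, h, hc]

theorem msfr_alt_eq : ∀ (arr : List Int),
    merge_sort_first_round arr = merge_sort_first_round_alt arr
  | [] => by decide
  | [x] => by
      rw [msfr_eq_flatMap]
      simp [merge_sort_first_round_alt, pvStep, PySem.List.pyGetD_of_nonneg]
  | x :: y :: t => by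
      have ih := msfr_alt_eq t
      rw [msfr_eq_flatMap]
      have hq : (((x :: y :: t).length + 1) / 2) = (t.length + 1) / 2 + 1 := by
        simp; omega
      rw [hq, List.range_succ_eq_map]
      simp only [List.flatMap_cons, List.flatMap_map]
      have h0 : pvStep (x :: y :: t) (2 * ((0 : Nat) : Int)) = if x ≤ y then [x, y] else [y, x] := by
        simp only [pvStep, List.map_cons, mul_zero, Nat.cast_zero]
        rw [if_pos (by simp)]
        simp [PySem.List.pyGetD_of_nonneg, merge_singletons]
      rw [h0]
      simp only [Nat.succ_eq_add_one, Nat.cast_add, Nat.cast_one]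
      rw [List.flatMap_congr (fun a (_ : a ∈ List.range ((t.length + 1) / 2)) =>
            pvStep_shift x y t a)]
      rw [← msfr_eq_flatMap t, ih]
      simp [merge_sort_first_round_alt]
termination_by arr => arr.length

-- ===== VERDICT (by name: the statement is the Claim_ definition above) =====
theorem merge_sort_first_round_spec : Claim_equal_merge_sort_first_round := by
  intro arr _
  unfold Spec_merge_sort_first_round
  exact msfr_alt_eq arr
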